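-- pv_equiv track=rewrite | github.com/cvbjasyogya-glitch/WMS | database.py | _replace_like_operators
-- ===== SOURCE A (Python) =====
-- def _replace_like_operators(query):
--     source = str(query or "")
--     result = []
--     index = 0
--     in_single_quote = False
--     in_double_quote = False
--
--     while index < len(source):
--         character = source[index]
--         if character == "'" and not in_double_quote:
--             in_single_quote = not in_single_quote
--             result.append(character)
--             index += 1
--             continue
--         if character == '"' and not in_single_quote:
--             in_double_quote = not in_double_quote
--             result.append(character)
--             index += 1
--             continue
--
--         if not in_single_quote and not in_double_quote:
--             upper_fragment = source[index:index + 8].upper()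
--             if upper_fragment.startswith("NOT LIKE"):
--                 result.append("NOT ILIKE")
--                 index += 8
--                 continue
--             upper_fragment = source[index:index + 4].upper()
--             if upper_fragment == "LIKE":
--                 previous = source[index - 1] if index > 0 else " "
--                 following = source[index + 4] if index + 4 < len(source) else " "
--                 if not (previous.isalnum() or previous == "_") and not (following.isalnum() or following == "_"):
--                     result.append("ILIKE")
--                     index += 4
--                     continue
--
--         result.append(character)
--         index += 1
--
--     return "".join(result)
-- ===== SOURCE B (Python) =====
-- def _replace_like_operators(query):
--     # Tokenize into quoted regions and out-of-quote chunks, then substitute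
--     # LIKE / NOT LIKE only inside the out-of-quote chunks.
--     source = str(query or "")
--     parts = []
--     i = 0
--     n = len(source)
--     while i < n:
--         if source[i] in "'\"":
--             q = source[i]
--             j = source.find(q, i + 1)
--             j = n if j == -1 else j + 1
--             parts.append(source[i:j])  # quoted token, copied verbatim
--             i = j
--         else:
--             j = i
--             while j < n and source[j] not in "'\"":
--                 j += 1
--             parts.append(_substitute(source[i:j]))
--             i = j
--     return "".join(parts)
--
--
-- def _substitute(chunk):
--     out = []
--     i = 0
--     n = len(chunk)
--     while i < n:
--         if chunk[i:i + 8].upper() == "NOT LIKE":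
--             out.append("NOT ILIKE")
--             i += 8
--             continue
--         if chunk[i:i + 4].upper() == "LIKE":
--             prev = chunk[i - 1] if i > 0 else " "
--             nxt = chunk[i + 4] if i + 4 < n else " "
--             if not (prev.isalnum() or prev == "_") and not (nxt.isalnum() or nxt == "_"):
--                 out.append("ILIKE")
--                 i += 4
--                 continue
--         out.append(chunk[i])
--         i += 1
--     return "".join(out)
-- ===== Notes on version B (the rewrite author's own statement) =====
-- stated objective: idiomatic
-- what changed: A interleaves quote tracking and replacement in one character-indexed state machine with in_single_quote/in_double_quote flags; B first tokenizes the query into quoted regions and out-of-quote chunks and then performs the NOT LIKE/LIKE substitution only inside the out-of-quote chunks, joining the tokens back.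
import Mathlib
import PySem

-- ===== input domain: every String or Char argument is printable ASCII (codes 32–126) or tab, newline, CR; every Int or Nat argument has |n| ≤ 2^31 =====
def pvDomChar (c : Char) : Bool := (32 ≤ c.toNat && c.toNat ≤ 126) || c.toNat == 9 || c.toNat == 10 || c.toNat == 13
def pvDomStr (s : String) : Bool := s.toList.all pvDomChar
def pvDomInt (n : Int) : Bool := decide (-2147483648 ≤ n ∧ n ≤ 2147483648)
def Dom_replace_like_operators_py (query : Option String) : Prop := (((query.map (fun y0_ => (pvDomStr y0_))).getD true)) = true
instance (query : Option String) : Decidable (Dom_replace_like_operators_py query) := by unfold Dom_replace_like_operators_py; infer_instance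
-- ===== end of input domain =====

-- B replaces A's single quote-tracking state machine by a tokenizer that splits the
-- query into quoted regions and out-of-quote chunks and substitutes only inside the
-- latter (objective: idiomatic; same cost).

-- ===== PORT A =====
-- shared character-level helpers (used by both ports)
def pvUp (c : Char) : Char := PySem.Chars.upperChar c
def pvWordChar (c : Char) : Bool := PySem.Chars.isalnum c || c == '_'
def pvNL : List Char := ['N', 'O', 'T', ' ', 'L', 'I', 'K', 'E']
def pvL : List Char := ['L', 'I', 'K', 'E']
def pvNotILike : List Char := ['N', 'O', 'T', ' ', 'I', 'L', 'I', 'K', 'E']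
def pvILike : List Char := ['I', 'L', 'I', 'K', 'E']
-- source[index:index+8].upper().startswith("NOT LIKE")  (slice has ≤ 8 chars, pattern 8 ⇒ equality)
def pvMatchNL (l : List Char) : Bool := (l.take 8).map pvUp == pvNL
-- source[index:index+4].upper() == "LIKE"
def pvMatchL (l : List Char) : Bool := (l.take 4).map pvUp == pvL

-- A's while loop over the remaining suffix; `prev` carries source[index-1] (default ' ').
def aLoop (prev : Char) (sq dq : Bool) (rest : List Char) : List Char :=
  match rest with
  | [] => []
  | c :: cs =>
    if c == '\'' && !dq then c :: aLoop c (!sq) dq cs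
    else if c == '"' && !sq then c :: aLoop c sq (!dq) cs
    else if !sq && !dq && pvMatchNL (c :: cs) then
      pvNotILike ++ aLoop ((c :: cs).getD 7 ' ') sq dq ((c :: cs).drop 8)
    else if !sq && !dq && pvMatchL (c :: cs) && !pvWordChar prev
            && !pvWordChar ((c :: cs).getD 4 ' ') then
      pvILike ++ aLoop ((c :: cs).getD 3 ' ') sq dq ((c :: cs).drop 4)
    else c :: aLoop c sq dq cs
termination_by rest.length
decreasing_by all_goals (simp <;> omega)

def replace_like_operators_py (query : Option String) : String :=
  String.ofList (aLoop ' ' false false (query.getD "").toList)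

-- ===== PORT B =====
def pvIsQuote (c : Char) : Bool := c == '\'' || c == '"'

-- B's _substitute on an out-of-quote chunk
def bSubst (prev : Char) (rest : List Char) : List Char :=
  match rest with
  | [] => []
  | c :: cs =>
    if pvMatchNL (c :: cs) then
      pvNotILike ++ bSubst ((c :: cs).getD 7 ' ') ((c :: cs).drop 8)
    else if pvMatchL (c :: cs) && !pvWordChar prev
            && !pvWordChar ((c :: cs).getD 4 ' ') then
      pvILike ++ bSubst ((c :: cs).getD 3 ' ') ((c :: cs).drop 4)
    else c :: bSubst c cs
termination_by rest.length
decreasing_by all_goals (simp <;> omega)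

-- B's tokenizing loop: quoted token copied verbatim, out-of-quote chunk substituted
def bLoop (s : List Char) : List Char :=
  match s with
  | [] => []
  | c :: cs =>
    if pvIsQuote c then
      match h : cs.dropWhile (fun x => x != c) with
      | [] => c :: cs.takeWhile (fun x => x != c)
      | q :: rest => (c :: (cs.takeWhile (fun x => x != c) ++ [q])) ++ bLoop rest
    else
      bSubst ' ' ((c :: cs).takeWhile (fun x => !pvIsQuote x))
        ++ bLoop ((c :: cs).dropWhile (fun x => !pvIsQuote x))
termination_by s.length
decreasing_by
  · have h1 : (cs.dropWhile (fun x => x != c)).length ≤ cs.length := cs.length_dropWhile_le _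
    rw [h] at h1; simp at h1 ⊢; omega
  · have h1 : (cs.dropWhile (fun x => !pvIsQuote x)).length ≤ cs.length := cs.length_dropWhile_le _
    simp only [List.dropWhile_cons]
    split <;> simp_all <;> omega

def replace_like_operators_py_alt (query : Option String) : String :=
  String.ofList (bLoop (query.getD "").toList)

-- ===== PRECONDITION & SPEC =====
def Spec_replace_like_operators_py (query : Option String) (out : String) : Prop := out = replace_like_operators_py_alt query
instance (query : Option String) (out : String) : Decidable (Spec_replace_like_operators_py query out) := by unfold Spec_replace_like_operators_py; infer_instance

-- ===== CLAIM (what is proved, stated in full; the proofs are below) =====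
def Claim_equal_replace_like_operators_py : Prop := ∀ (query : Option String), Dom_replace_like_operators_py query → Spec_replace_like_operators_py query (replace_like_operators_py query)

-- ===== LEMMAS AND PROOFS =====

theorem pvWordChar_quote {q : Char} (h : pvIsQuote q = true) : pvWordChar q = false := by
  simp [pvIsQuote] at h
  rcases h with rfl | rfl <;> decide

theorem pvUp_quote {q : Char} (h : pvIsQuote q = true) : pvUp q = q := by
  simp [pvIsQuote] at h
  rcases h with rfl | rfl <;> decide

-- a quote among the first pat.length characters kills the match
theorem pvTakeMapNe (pat l : List Char) (q : Char) (rs : List Char)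
    (hq : pvIsQuote q = true) (hpat : ∀ c ∈ pat, pvIsQuote c = false)
    (hlen : l.length < pat.length) :
    ((l ++ q :: rs).take pat.length).map pvUp ≠ pat := by
  induction pat generalizing l with
  | nil => simp at hlen
  | cons p ps ih =>
    cases l with
    | nil =>
      intro h
      simp [pvUp_quote hq] at h
      have := hpat p (by simp)
      rw [← h.1] at this
      rw [this] at hq
      simp at hq
    | cons a l' =>
      rw [show ((p :: ps : List Char)).length = ps.length + 1 from rfl, List.cons_append,
        List.take_succ_cons, List.map_cons]
      intro h
      rw [List.cons.injEq] at h
      exact ih l' (fun c hc => hpat c (by simp [hc])) (by simp at hlen; omega) h.2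

theorem pvTakeShortNe (pat l : List Char) (hlen : l.length < pat.length) :
    (l.take pat.length).map pvUp ≠ pat := by
  intro h
  have := congrArg List.length h
  simp at this
  omega

theorem pvMatchEq (pat l rest : List Char)
    (hpat : ∀ c ∈ pat, pvIsQuote c = false)
    (hrest : rest = [] ∨ ∃ q rs, rest = q :: rs ∧ pvIsQuote q = true) :
    (((l ++ rest).take pat.length).map pvUp == pat) = ((l.take pat.length).map pvUp == pat) := by
  by_cases hl : pat.length ≤ l.length
  · rw [List.take_append_of_le_length hl]
  · have hl' : l.length < pat.length := by omega
    rcases hrest with rfl | ⟨q, rs, rfl, hq⟩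
    · simp
    · have h1 := pvTakeMapNe pat l q rs hq hpat hl'
      have h2 := pvTakeShortNe pat l hl'
      rw [show ((((l ++ q :: rs).take pat.length).map pvUp) == pat) = false from
            beq_eq_false_iff_ne.mpr h1,
          show (((l.take pat.length).map pvUp) == pat) = false from
            beq_eq_false_iff_ne.mpr h2]

theorem pvMatchNL_append (l rest : List Char)
    (hrest : rest = [] ∨ ∃ q rs, rest = q :: rs ∧ pvIsQuote q = true) :
    pvMatchNL (l ++ rest) = pvMatchNL l := by
  have := pvMatchEq pvNL l rest (by simp [pvNL, pvIsQuote]) hrest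
  simpa [pvMatchNL, pvNL] using this

theorem pvMatchL_append (l rest : List Char)
    (hrest : rest = [] ∨ ∃ q rs, rest = q :: rs ∧ pvIsQuote q = true) :
    pvMatchL (l ++ rest) = pvMatchL l := by
  have := pvMatchEq pvL l rest (by simp [pvL, pvIsQuote]) hrest
  simpa [pvMatchL, pvL] using this

theorem pvMatchNL_length (l : List Char) (h : pvMatchNL l = true) : 8 ≤ l.length := by
  simp [pvMatchNL] at h
  have := congrArg List.length h
  simp [pvNL] at this
  omega

theorem pvMatchL_length (l : List Char) (h : pvMatchL l = true) : 4 ≤ l.length := by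
  simp [pvMatchL] at h
  have := congrArg List.length h
  simp [pvL] at this
  omega

theorem pvGetD_append_left (l r : List Char) (i : Nat) (d : Char) (h : i < l.length) :
    (l ++ r).getD i d = l.getD i d := by
  simp [List.getD, List.getElem?_append_left h]

theorem dropWhile_head_false {p : Char → Bool} {l : List Char} {q : Char} {rs : List Char}
    (h : l.dropWhile p = q :: rs) : p q = false := by
  induction l with
  | nil => simp at h
  | cons a l ih =>
    rw [List.dropWhile_cons] at h
    by_cases hp : p a = true
    · rw [if_pos hp] at h; exact ih h
    · rw [if_neg hp] at h
      cases h
      simpa using hp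

-- prev is read only through pvWordChar
theorem aLoop_prev (p1 p2 : Char) (h : pvWordChar p1 = pvWordChar p2)
    (sq dq : Bool) (rest : List Char) :
    aLoop p1 sq dq rest = aLoop p2 sq dq rest := by
  cases rest with
  | nil => rw [aLoop, aLoop]
  | cons c cs => rw [aLoop, aLoop, h]

theorem aLoop_boundary (p1 p2 : Char) (rest : List Char)
    (hrest : rest = [] ∨ ∃ q rs, rest = q :: rs ∧ pvIsQuote q = true) :
    aLoop p1 false false rest = aLoop p2 false false rest := by
  rcases hrest with rfl | ⟨q, rs, rfl, hq⟩
  · rw [aLoop, aLoop]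
  · simp [pvIsQuote] at hq
    rcases hq with rfl | rfl <;> rw [aLoop, aLoop] <;> simp

-- inside a single-quoted region everything is copied verbatim
theorem aLoop_sq (p : Char) (body rest : List Char)
    (hb : ∀ c ∈ body, (c == '\'') = false)
    (hr : rest = [] ∨ ∃ rs, rest = '\'' :: rs) :
    aLoop p true false (body ++ rest) = body ++ aLoop ' ' true false rest := by
  match body with
  | [] =>
    rcases hr with rfl | ⟨rs, rfl⟩
    · rw [List.nil_append, List.nil_append, aLoop, aLoop]
    · simp only [List.nil_append]
      rw [aLoop, aLoop]
      simp
  | a :: body' =>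
    have ha := hb a (by simp)
    rw [List.cons_append, aLoop]
    simp only [ha, Bool.false_and, Bool.not_true, Bool.and_false, Bool.false_eq_true, if_false,
      Bool.false_and, List.cons_append]
    rw [aLoop_sq a body' rest (fun c hc => hb c (by simp [hc])) hr]

-- inside a double-quoted region everything is copied verbatim
theorem aLoop_dq (p : Char) (body rest : List Char)
    (hb : ∀ c ∈ body, (c == '"') = false)
    (hr : rest = [] ∨ ∃ rs, rest = '"' :: rs) :
    aLoop p false true (body ++ rest) = body ++ aLoop ' ' false true rest := by
  match body with
  | [] =>
    rcases hr with rfl | ⟨rs, rfl⟩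
    · rw [List.nil_append, List.nil_append, aLoop, aLoop]
    · simp only [List.nil_append]
      rw [aLoop, aLoop]
      simp
  | a :: body' =>
    have ha := hb a (by simp)
    rw [List.cons_append, aLoop]
    simp only [ha, Bool.false_and, Bool.not_true, Bool.and_false, Bool.false_eq_true, if_false,
      Bool.false_and, List.cons_append]
    rw [aLoop_dq a body' rest (fun c hc => hb c (by simp [hc])) hr]

-- out-of-quote chunk: A's loop agrees with B's _substitute
theorem aLoop_chunk (prev : Char) (chunk rest : List Char)
    (hch : ∀ c ∈ chunk, pvIsQuote c = false)
    (hrest : rest = [] ∨ ∃ q rs, rest = q :: rs ∧ pvIsQuote q = true) :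
    aLoop prev false false (chunk ++ rest) = bSubst prev chunk ++ aLoop ' ' false false rest := by
  match chunk with
  | [] =>
    rw [List.nil_append, bSubst, List.nil_append]
    exact aLoop_boundary prev ' ' rest hrest
  | c :: cs =>
    have hc : pvIsQuote c = false := hch c (by simp)
    have hc' : ¬c = '\'' ∧ ¬c = '"' := by simpa [pvIsQuote] using hc
    have hc1 : (c == '\'') = false := beq_eq_false_iff_ne.mpr hc'.1
    have hc2 : (c == '"') = false := beq_eq_false_iff_ne.mpr hc'.2
    have hNL : pvMatchNL (c :: (cs ++ rest)) = pvMatchNL (c :: cs) := by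
      have := pvMatchNL_append (c :: cs) rest hrest
      simpa using this
    have hL : pvMatchL (c :: (cs ++ rest)) = pvMatchL (c :: cs) := by
      have := pvMatchL_append (c :: cs) rest hrest
      simpa using this
    rw [List.cons_append, aLoop, bSubst]
    by_cases h8 : pvMatchNL (c :: cs) = true
    · have hlen : 8 ≤ (c :: cs).length := pvMatchNL_length _ h8
      have hgd : (c :: (cs ++ rest)).getD 7 ' ' = (c :: cs).getD 7 ' ' := by
        rw [← List.cons_append]
        exact pvGetD_append_left _ _ _ _ (by omega)
      have hdr : (c :: (cs ++ rest)).drop 8 = (c :: cs).drop 8 ++ rest := by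
        rw [← List.cons_append]
        exact List.drop_append_of_le_length hlen
      simp only [hc1, hc2, hNL, h8, Bool.false_and, Bool.and_false, Bool.not_false,
        Bool.true_and, Bool.and_true, Bool.false_eq_true, if_false, if_true]
      rw [hgd, hdr,
        aLoop_chunk ((c :: cs).getD 7 ' ') ((c :: cs).drop 8) rest
          (fun x hx => hch x (List.mem_of_mem_drop hx)) hrest,
        List.append_assoc]
    · have h8' : pvMatchNL (c :: cs) = false := by simpa using h8
      have hcond : (pvMatchL (c :: (cs ++ rest)) && !pvWordChar prev
            && !pvWordChar ((c :: (cs ++ rest)).getD 4 ' '))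
          = (pvMatchL (c :: cs) && !pvWordChar prev && !pvWordChar ((c :: cs).getD 4 ' ')) := by
        rw [hL]
        by_cases hm : pvMatchL (c :: cs) = true
        · have hlen : 4 ≤ (c :: cs).length := pvMatchL_length _ hm
          by_cases hgt : 4 < (c :: cs).length
          · rw [show (c :: (cs ++ rest)).getD 4 ' ' = (c :: cs).getD 4 ' ' by
              rw [← List.cons_append]; exact pvGetD_append_left _ _ _ _ hgt]
          · have hl4 : (c :: cs).length = 4 := by omega
            rcases hrest with rfl | ⟨q, rs, rfl, hq⟩
            · simp
            · have e1 : (c :: (cs ++ q :: rs)).getD 4 ' ' = q := by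
                rw [← List.cons_append]
                simp only [List.getD]
                rw [List.getElem?_append_right (by omega), hl4]
                simp
              have e2 : (c :: cs).getD 4 ' ' = ' ' := by
                simp [List.getD, List.getElem?_eq_none (by omega : (c :: cs).length ≤ 4)]
              rw [e1, e2, pvWordChar_quote hq, show pvWordChar ' ' = false from by decide]
        · have hm' : pvMatchL (c :: cs) = false := by simpa using hm
          rw [hm']
          simp
      by_cases hb4 : (pvMatchL (c :: cs) && !pvWordChar prev
          && !pvWordChar ((c :: cs).getD 4 ' ')) = true
      · have hlen : 4 ≤ (c :: cs).length := pvMatchL_length _ (by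
          rcases Bool.and_eq_true_iff.mp hb4 with ⟨h', _⟩
          exact (Bool.and_eq_true_iff.mp h').1)
        have hgd : (c :: (cs ++ rest)).getD 3 ' ' = (c :: cs).getD 3 ' ' := by
          rw [← List.cons_append]
          exact pvGetD_append_left _ _ _ _ (by omega)
        have hdr : (c :: (cs ++ rest)).drop 4 = (c :: cs).drop 4 ++ rest := by
          rw [← List.cons_append]
          exact List.drop_append_of_le_length hlen
        simp only [hc1, hc2, hNL, h8', hcond, hb4, Bool.false_and, Bool.and_false,
          Bool.not_false, Bool.true_and, Bool.and_true, Bool.false_eq_true, if_false, if_true]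
        rw [hgd, hdr,
          aLoop_chunk ((c :: cs).getD 3 ' ') ((c :: cs).drop 4) rest
            (fun x hx => hch x (List.mem_of_mem_drop hx)) hrest,
          List.append_assoc]
      · have hb4' : (pvMatchL (c :: cs) && !pvWordChar prev
            && !pvWordChar ((c :: cs).getD 4 ' ')) = false := by simpa using hb4
        simp only [hc1, hc2, hNL, h8', hcond, hb4', Bool.false_and, Bool.and_false,
          Bool.not_false, Bool.true_and, Bool.and_true, Bool.false_eq_true, if_false]
        rw [aLoop_chunk c cs rest (fun x hx => hch x (by simp [hx])) hrest, List.cons_append]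
termination_by chunk.length
decreasing_by all_goals (simp <;> omega)

-- A's state machine equals B's tokenize-and-substitute loop
theorem main_eq (s : List Char) : aLoop ' ' false false s = bLoop s := by
  match s with
  | [] => rw [aLoop, bLoop]
  | c :: cs =>
    by_cases hq : pvIsQuote c = true
    · have hq' : c = '\'' ∨ c = '"' := by simpa [pvIsQuote] using hq
      rcases hq' with rfl | rfl
      · have hb : ∀ x ∈ cs.takeWhile (fun x => x != '\''), (x == '\'') = false := by
          intro x hx
          have := List.mem_takeWhile_imp hx
          simpa using this
        rw [bLoop, if_pos hq, aLoop, if_pos (by decide)]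
        simp only [Bool.not_false]
        split
        · rename_i heq
          have hcs : cs = cs.takeWhile (fun x => x != '\'') ++ ([] : List Char) := by
            conv_lhs => rw [← List.takeWhile_append_dropWhile (p := fun x => x != '\'') (l := cs)]
            rw [heq]
          conv_lhs => rw [hcs]
          rw [aLoop_sq '\'' _ _ hb (Or.inl rfl), aLoop, List.append_nil]
        · rename_i q rest heq
          have hq2 : q = '\'' := by
            have := dropWhile_head_false heq
            simpa using this
          subst hq2
          have hcs : cs = cs.takeWhile (fun x => x != '\'') ++ '\'' :: rest := by
            conv_lhs => rw [← List.takeWhile_append_dropWhile (p := fun x => x != '\'') (l := cs)]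
            rw [heq]
          have hlt : rest.length < cs.length + 1 := by
            have := congrArg List.length heq
            have h2 := List.length_dropWhile_le (l := cs) (p := fun x => x != '\'')
            simp at this
            omega
          conv_lhs => rw [hcs]
          rw [aLoop_sq '\'' _ _ hb (Or.inr ⟨rest, rfl⟩), aLoop, if_pos (by decide)]
          simp only [Bool.not_true]
          rw [aLoop_prev '\'' ' ' (by decide) false false rest, main_eq rest]
          simp
      · have hb : ∀ x ∈ cs.takeWhile (fun x => x != '"'), (x == '"') = false := by
          intro x hx
          have := List.mem_takeWhile_imp hx
          simpa using this
        rw [bLoop, if_pos hq, aLoop, if_neg (by decide), if_pos (by decide)]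
        simp only [Bool.not_false]
        split
        · rename_i heq
          have hcs : cs = cs.takeWhile (fun x => x != '"') ++ ([] : List Char) := by
            conv_lhs => rw [← List.takeWhile_append_dropWhile (p := fun x => x != '"') (l := cs)]
            rw [heq]
          conv_lhs => rw [hcs]
          rw [aLoop_dq '"' _ _ hb (Or.inl rfl), aLoop, List.append_nil]
        · rename_i q rest heq
          have hq2 : q = '"' := by
            have := dropWhile_head_false heq
            simpa using this
          subst hq2
          have hcs : cs = cs.takeWhile (fun x => x != '"') ++ '"' :: rest := by
            conv_lhs => rw [← List.takeWhile_append_dropWhile (p := fun x => x != '"') (l := cs)]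
            rw [heq]
          have hlt : rest.length < cs.length + 1 := by
            have := congrArg List.length heq
            have h2 := List.length_dropWhile_le (l := cs) (p := fun x => x != '"')
            simp at this
            omega
          conv_lhs => rw [hcs]
          rw [aLoop_dq '"' _ _ hb (Or.inr ⟨rest, rfl⟩), aLoop, if_neg (by decide),
            if_pos (by decide)]
          simp only [Bool.not_true]
          rw [aLoop_prev '"' ' ' (by decide) false false rest, main_eq rest]
          simp
    · have hqf : pvIsQuote c = false := by simpa using hq
      have hch : ∀ x ∈ (c :: cs).takeWhile (fun x => !pvIsQuote x), pvIsQuote x = false := by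
        intro x hx
        have := List.mem_takeWhile_imp hx
        simpa using this
      have hdw1 : (c :: cs).dropWhile (fun x => !pvIsQuote x)
          = cs.dropWhile (fun x => !pvIsQuote x) := by
        rw [List.dropWhile_cons, if_pos (by simp [hqf])]
      rw [bLoop, if_neg (by simp [hqf])]
      cases hdw : (c :: cs).dropWhile (fun x => !pvIsQuote x) with
      | nil =>
        conv_lhs => rw [show c :: cs = (c :: cs).takeWhile (fun x => !pvIsQuote x)
            ++ (c :: cs).dropWhile (fun x => !pvIsQuote x) from
          (List.takeWhile_append_dropWhile).symm]
        rw [hdw, aLoop_chunk ' ' _ _ hch (Or.inl rfl), aLoop, bLoop]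
      | cons q rs =>
        have hq2 : pvIsQuote q = true := by
          have := dropWhile_head_false hdw
          simpa using this
        have hlt : (q :: rs).length < (c :: cs).length := by
          rw [hdw1] at hdw
          have := congrArg List.length hdw
          have h2 := List.length_dropWhile_le (l := cs) (p := fun x => !pvIsQuote x)
          simp at this ⊢
          omega
        conv_lhs => rw [show c :: cs = (c :: cs).takeWhile (fun x => !pvIsQuote x)
            ++ (c :: cs).dropWhile (fun x => !pvIsQuote x) from
          (List.takeWhile_append_dropWhile).symm]
        rw [hdw, aLoop_chunk ' ' _ _ hch (Or.inr ⟨q, rs, rfl, hq2⟩), main_eq (q :: rs)]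
termination_by s.length
decreasing_by all_goals (simp at hlt ⊢ <;> omega)

-- ===== VERDICT (by name: the statement is the Claim_ definition above) =====
theorem replace_like_operators_py_spec : Claim_equal_replace_like_operators_py := by
  intro query _
  unfold Spec_replace_like_operators_py replace_like_operators_py replace_like_operators_py_alt
  rw [main_eq]
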